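-- pv_equiv track=rewrite | github.com/CMU-cabot/cabot-navigation | mf_localization_mapping/script/adjust_floormaps_latlng.py | _iter_top_level_objects
-- ===== SOURCE A (Python) =====
-- def _iter_top_level_objects(text: str):
--     """
--     Yield (start_idx, end_idx_exclusive) for each top-level JSON object within a root array.
--     Preserves exact original formatting by operating on text indices.
--     """
--     in_str = False
--     esc = False
--     depth = 0
--     obj_start = None
--     for i, ch in enumerate(text):
--         if in_str:
--             if esc:
--                 esc = False
--             elif ch == "\\":
--                 esc = True
--             elif ch == '"':
--                 in_str = False
--             continue
--
--         if ch == '"':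
--             in_str = True
--             continue
--
--         if ch == "{":
--             if depth == 0:
--                 obj_start = i
--             depth += 1
--             continue
--
--         if ch == "}":
--             if depth > 0:
--                 depth -= 1
--                 if depth == 0 and obj_start is not None:
--                     yield obj_start, i + 1
--                     obj_start = None
-- ===== SOURCE B (Python) =====
-- def _iter_top_level_objects(text: str):
--     """
--     Yield (start_idx, end_idx_exclusive) for each top-level JSON object within a root array.
--     Staged pipeline: (1) boolean mask of structural positions (outside string
--     literals), (2) extract brace events, (3) clamped depth prefix sequence,
--     (4) pair the 0->1 depth transitions (starts) with the 1->0 transitions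
--     (ends) by zipping the two transition lists.
--     """
--     # Stage 1: mask[i] is True iff position i is structural (not part of a string literal).
--     mask = []
--     i, n = 0, len(text)
--     while i < n:
--         if text[i] != '"':
--             mask.append(True)
--             i += 1
--             continue
--         mask.append(False)  # opening quote
--         i += 1
--         while i < n:
--             if text[i] == "\\":
--                 mask.append(False)
--                 if i + 1 < n:
--                     mask.append(False)
--                 i += 2
--             elif text[i] == '"':
--                 mask.append(False)
--                 i += 1
--                 break
--             else:
--                 mask.append(False)
--                 i += 1
--
--     # Stage 2: structural brace events.
--     events = [(k, c) for k, (c, ok) in enumerate(zip(text, mask)) if ok and c in "{}"]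
--
--     # Stage 3: clamped depth just BEFORE each event.
--     depths = []
--     d = 0
--     for _, c in events:
--         depths.append(d)
--         d = d + 1 if c == "{" else max(d - 1, 0)
--
--     # Stage 4: starts are 0->1 transitions, ends are 1->0 transitions; they
--     # interleave strictly (s1 < e1 < s2 < e2 < ...), so zip pairs them up and
--     # drops a trailing unclosed start, exactly as the original generator does.
--     starts = [k for (k, c), d in zip(events, depths) if c == "{" and d == 0]
--     ends = [k + 1 for (k, c), d in zip(events, depths) if c == "}" and d == 1]
--     yield from zip(starts, ends)
-- ===== Notes on version B (the rewrite author's own statement) =====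
-- stated objective: alternative
-- what changed: Replaces the one-pass yielding state machine by a staged pipeline: build a boolean mask of structural positions, extract brace events by comprehension, compute the clamped depth prefix sequence, and pair the 0->1 start transitions with the 1->0 end transitions via zip.
import Mathlib
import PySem

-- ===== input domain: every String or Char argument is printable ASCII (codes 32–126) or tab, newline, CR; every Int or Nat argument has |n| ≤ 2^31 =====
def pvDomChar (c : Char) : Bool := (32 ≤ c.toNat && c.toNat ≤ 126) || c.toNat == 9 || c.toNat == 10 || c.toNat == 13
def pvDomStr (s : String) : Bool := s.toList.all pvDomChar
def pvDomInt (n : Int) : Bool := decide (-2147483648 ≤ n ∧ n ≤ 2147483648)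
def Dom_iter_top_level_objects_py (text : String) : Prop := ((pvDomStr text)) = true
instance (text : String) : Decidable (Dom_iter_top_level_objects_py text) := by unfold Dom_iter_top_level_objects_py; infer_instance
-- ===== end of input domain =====

-- B replaces A's single-pass yielding state machine by a staged pipeline (mask → events →
-- depth prefix sequence → zip of start/end transitions); both are total and agree everywhere.

-- ===== PORT A =====
-- A's single for-loop over enumerate(text) with state (in_str, esc, depth, obj_start);
-- the generator's yields are collected into the result list in order.
def loopA_iter (cs : List Char) (i : Int) (in_str esc : Bool) (depth : Int)
    (obj_start : Option Int) : List (Int × Int) :=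
  match cs with
  | [] => []
  | ch :: rest =>
    if in_str then
      if esc then loopA_iter rest (i+1) true false depth obj_start
      else if ch = '\\' then loopA_iter rest (i+1) true true depth obj_start
      else if ch = '"' then loopA_iter rest (i+1) false esc depth obj_start
      else loopA_iter rest (i+1) true esc depth obj_start
    else if ch = '"' then loopA_iter rest (i+1) true esc depth obj_start
    else if ch = '{' then
      loopA_iter rest (i+1) in_str esc (depth+1)
        (if depth = 0 then some i else obj_start)
    else if ch = '}' then
      if depth > 0 then
        if depth - 1 = 0 then
          match obj_start with
          | some s => (s, i+1) :: loopA_iter rest (i+1) in_str esc (depth-1) none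
          | none => loopA_iter rest (i+1) in_str esc (depth-1) obj_start
        else loopA_iter rest (i+1) in_str esc (depth-1) obj_start
      else loopA_iter rest (i+1) in_str esc depth obj_start
    else loopA_iter rest (i+1) in_str esc depth obj_start

def iter_top_level_objects_py (text : String) : List (Int × Int) :=
  loopA_iter text.toList 0 false false 0 none

-- ===== PORT B =====
-- Stage 1 of Source B: the structural mask (True outside string literals); the outer while-loop
-- is maskB, its inner string-skipping while-loop is maskInner.
mutual
def maskB : List Char → List Bool
  | [] => []
  | c :: r => if c ≠ '"' then true :: maskB r else false :: maskInner r
termination_by cs => cs.length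
def maskInner : List Char → List Bool
  | [] => []
  | c :: r =>
    if c = '\\' then
      match r with
      | [] => [false]
      | _ :: r2 => false :: false :: maskInner r2
    else if c = '"' then false :: maskB r
    else false :: maskInner r
termination_by cs => cs.length
end

-- port of Python's enumerate (indices as Int, starting at i)
def enumFrom {α : Type} (i : Int) : List α → List (Int × α)
  | [] => []
  | a :: r => (i, a) :: enumFrom (i+1) r

-- Stage 2 of Source B: structural brace events, a comprehension over enumerate(zip(text, mask)).
def eventsB (cs : List Char) : List (Int × Char) :=
  (enumFrom 0 (cs.zip (maskB cs))).filterMap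
    (fun p => if p.2.2 && (p.2.1 == '{' || p.2.1 == '}') then some (p.1, p.2.1) else none)

-- Stage 3 of Source B: clamped depth just before each event.
def depthsB : List (Int × Char) → Int → List Int
  | [], _ => []
  | (_, c) :: r, d => d :: depthsB r (if c = '{' then d + 1 else max (d - 1) 0)

-- Stage 4 of Source B: the two transition comprehensions and their zip.
def startsB (es : List (Int × Char)) (ds : List Int) : List Int :=
  (es.zip ds).filterMap (fun p => if p.1.2 == '{' && p.2 == 0 then some p.1.1 else none)

def endsB (es : List (Int × Char)) (ds : List Int) : List Int :=
  (es.zip ds).filterMap (fun p => if p.1.2 == '}' && p.2 == 1 then some (p.1.1 + 1) else none)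

def iter_top_level_objects_py_alt (text : String) : List (Int × Int) :=
  let cs := text.toList
  let es := eventsB cs
  let ds := depthsB es 0
  (startsB es ds).zip (endsB es ds)

-- ===== PRECONDITION & SPEC =====
def Spec_iter_top_level_objects_py (text : String) (out : List (Int × Int)) : Prop := out = iter_top_level_objects_py_alt text
instance (text : String) (out : List (Int × Int)) : Decidable (Spec_iter_top_level_objects_py text out) := by unfold Spec_iter_top_level_objects_py; infer_instance

-- ===== CLAIM (what is proved, stated in full; the proofs are below) =====
def Claim_equal_iter_top_level_objects_py : Prop := ∀ (text : String), Dom_iter_top_level_objects_py text → Spec_iter_top_level_objects_py text (iter_top_level_objects_py text)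

-- ===== LEMMAS AND PROOFS =====

-- the filter function of eventsB, named (definitionally equal to the inline lambda)
def fEv : Int × (Char × Bool) → Option (Int × Char) :=
  fun p => if p.2.2 && (p.2.1 == '{' || p.2.1 == '}') then some (p.1, p.2.1) else none

theorem eventsB_eq (cs : List Char) :
    eventsB cs = (enumFrom 0 (cs.zip (maskB cs))).filterMap fEv := rfl

theorem fEv_false (i : Int) (c : Char) : fEv (i, (c, false)) = none := by simp [fEv]

theorem fEv_true_br (i : Int) (c : Char) (h : c = '{' ∨ c = '}') :
    fEv (i, (c, true)) = some (i, c) := by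
  rcases h with h | h <;> simp [fEv, h]

theorem fEv_true_nb (i : Int) (c : Char) (h : ¬ (c = '{' ∨ c = '}')) :
    fEv (i, (c, true)) = none := by
  push_neg at h
  simp [fEv, h.1, h.2]

-- unfolding lemmas for the mutual definitions
theorem maskB_nil : maskB [] = [] := by rw [maskB.eq_def]

theorem maskB_cons (c : Char) (r : List Char) :
    maskB (c :: r) = if c ≠ '"' then true :: maskB r else false :: maskInner r := by
  rw [maskB.eq_def]

theorem maskInner_nil : maskInner [] = [] := by rw [maskInner.eq_def]

theorem maskInner_cons (c : Char) (r : List Char) :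
    maskInner (c :: r) =
      if c = '\\' then
        (match r with
         | [] => [false]
         | _ :: r2 => false :: false :: maskInner r2)
      else if c = '"' then false :: maskB r
      else false :: maskInner r := by
  rw [maskInner.eq_def]

-- Proof-side extractor of structural brace events, as one machine (outside / inside a string).
mutual
def evOut : List Char → Int → List (Int × Char)
  | [], _ => []
  | c :: r, i =>
    if c = '"' then evIn r (i+1)
    else if c = '{' ∨ c = '}' then (i, c) :: evOut r (i+1)
    else evOut r (i+1)
termination_by cs _ => cs.length
def evIn : List Char → Int → List (Int × Char)
  | [], _ => []
  | c :: r, i =>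
    if c = '\\' then
      match r with
      | [] => []
      | _ :: r2 => evIn r2 (i+2)
    else if c = '"' then evOut r (i+1)
    else evIn r (i+1)
termination_by cs _ => cs.length
end

theorem evOut_nil (i : Int) : evOut [] i = [] := by rw [evOut.eq_def]

theorem evOut_cons (c : Char) (r : List Char) (i : Int) :
    evOut (c :: r) i =
      if c = '"' then evIn r (i+1)
      else if c = '{' ∨ c = '}' then (i, c) :: evOut r (i+1)
      else evOut r (i+1) := by
  rw [evOut.eq_def]

theorem evIn_nil (i : Int) : evIn [] i = [] := by rw [evIn.eq_def]

theorem evIn_cons (c : Char) (r : List Char) (i : Int) :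
    evIn (c :: r) i =
      if c = '\\' then
        (match r with
         | [] => []
         | _ :: r2 => evIn r2 (i+2))
      else if c = '"' then evOut r (i+1)
      else evIn r (i+1) := by
  rw [evIn.eq_def]

-- events extracted by the mask + comprehension = the machine extractor (mutual induction)
mutual
theorem eventsB_out : ∀ (cs : List Char) (i : Int),
    (enumFrom i (cs.zip (maskB cs))).filterMap fEv = evOut cs i
  | [], i => by rw [maskB_nil, evOut_nil]; rfl
  | c :: r, i => by
    rw [maskB_cons, evOut_cons]
    by_cases h : c = '"'
    · simp only [h, ne_eq, not_true_eq_false, ite_false, ite_true, List.zip_cons_cons, enumFrom,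
        List.filterMap_cons, fEv_false]
      exact eventsB_in r (i+1)
    · simp only [ne_eq, h, not_false_eq_true, ite_true, ite_false, List.zip_cons_cons, enumFrom,
        List.filterMap_cons]
      by_cases hb : c = '{' ∨ c = '}'
      · rw [fEv_true_br i c hb]
        simp only [hb, ite_true]
        rw [eventsB_out r (i+1)]
      · rw [fEv_true_nb i c hb]
        simp only [hb, ite_false]
        exact eventsB_out r (i+1)
termination_by cs _ => cs.length
theorem eventsB_in : ∀ (cs : List Char) (i : Int),
    (enumFrom i (cs.zip (maskInner cs))).filterMap fEv = evIn cs i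
  | [], i => by rw [maskInner_nil, evIn_nil]; rfl
  | c :: r, i => by
    rw [maskInner_cons, evIn_cons]
    by_cases h1 : c = '\\'
    · cases r with
      | nil =>
        simp only [h1, ite_true, List.zip_cons_cons, enumFrom, List.filterMap_cons, fEv_false]
        rfl
      | cons c2 r2 =>
        simp only [h1, ite_true, List.zip_cons_cons, enumFrom, List.filterMap_cons, fEv_false]
        have e : i + 1 + 1 = i + 2 := by ring
        rw [e]; exact eventsB_in r2 (i+2)
    · by_cases h2 : c = '"'
      · simp only [h1, ite_false, h2, ite_true, List.zip_cons_cons, enumFrom,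
          List.filterMap_cons, fEv_false]
        exact eventsB_out r (i+1)
      · simp only [h1, h2, ite_false, List.zip_cons_cons, enumFrom, List.filterMap_cons, fEv_false]
        exact eventsB_in r (i+1)
termination_by cs _ => cs.length
end

-- the machine extractor emits only braces
mutual
theorem evOut_braces : ∀ (cs : List Char) (i : Int) (p : Int × Char), p ∈ evOut cs i →
    p.2 = '{' ∨ p.2 = '}'
  | [], i => by rw [evOut_nil]; intro p h; cases h
  | c :: r, i => by
    rw [evOut_cons]
    by_cases h : c = '"'
    · simp only [h, ite_true]; exact evIn_braces r (i+1)
    · by_cases hb : c = '{' ∨ c = '}'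
      · simp only [h, ite_false, hb, ite_true]
        intro p hp
        rcases List.mem_cons.mp hp with hp | hp
        · subst hp; exact hb
        · exact evOut_braces r (i+1) p hp
      · simp only [h, ite_false, hb]
        exact evOut_braces r (i+1)
termination_by cs _ => cs.length
theorem evIn_braces : ∀ (cs : List Char) (i : Int) (p : Int × Char), p ∈ evIn cs i →
    p.2 = '{' ∨ p.2 = '}'
  | [], i => by rw [evIn_nil]; intro p h; cases h
  | c :: r, i => by
    rw [evIn_cons]
    by_cases h1 : c = '\\'
    · cases r with
      | nil => simp only [h1, ite_true]; intro p h; cases h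
      | cons c2 r2 => simp only [h1, ite_true]; exact evIn_braces r2 (i+2)
    · by_cases h2 : c = '"'
      · simp only [h1, ite_false, h2, ite_true]; exact evOut_braces r (i+1)
      · simp only [h1, h2, ite_false]; exact evIn_braces r (i+1)
termination_by cs _ => cs.length
end

-- single-pass pairing machine over the event list (proof intermediary between A and B)
def loopC : List (Int × Char) → Int → Int → List (Int × Int)
  | [], _, _ => []
  | (i, c) :: r, d, b =>
    if c = '{' then loopC r (d+1) (if d = 0 then i else b)
    else if d > 0 then
      (if d = 1 then [(b, i+1)] else []) ++ loopC r (d-1) b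
    else loopC r d b

theorem loopC_nil (d b : Int) : loopC [] d b = [] := by rw [loopC.eq_def]

theorem loopC_cons (i : Int) (c : Char) (r : List (Int × Char)) (d b : Int) :
    loopC ((i, c) :: r) d b =
      if c = '{' then loopC r (d+1) (if d = 0 then i else b)
      else if d > 0 then (if d = 1 then [(b, i+1)] else []) ++ loopC r (d-1) b
      else loopC r d b := by
  rw [loopC.eq_def]

-- A inside a string literal (esc = false) skips to after the closing quote, and evIn on the
-- same suffix equals evOut there; both captured via skipS.
def skipS (cs : List Char) (j : Int) : List Char × Int :=
  match cs with
  | [] => (cs, j)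
  | c :: rest =>
    if c = '\\' then
      match rest with
      | [] => ([], j+2)
      | _ :: rest2 => skipS rest2 (j+2)
    else if c = '"' then (rest, j+1)
    else skipS rest (j+1)

theorem skipS_len_le : ∀ (cs : List Char) (j : Int), (skipS cs j).1.length ≤ cs.length
  | [], j => by rw [skipS.eq_def]
  | c :: rest, j => by
    rw [skipS.eq_def]
    by_cases h1 : c = '\\'
    · cases rest with
      | nil => simp [h1]
      | cons c2 rest2 =>
        have := skipS_len_le rest2 (j+2)
        simp [h1]; omega
    · by_cases h2 : c = '"'
      · simp [h2]
      · have := skipS_len_le rest (j+1)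
        simp [h1, h2]; omega

theorem loopA_in_str : ∀ (cs : List Char) (j : Int) (depth : Int) (os : Option Int),
    loopA_iter cs j true false depth os =
      loopA_iter (skipS cs j).1 (skipS cs j).2 false false depth os
  | [], j, depth, os => by
    rw [skipS.eq_def]; simp; rw [loopA_iter.eq_def]; rw [loopA_iter.eq_def]
  | c :: rest, j, depth, os => by
    rw [skipS.eq_def]
    by_cases h1 : c = '\\'
    · cases rest with
      | nil =>
        simp only [h1]
        rw [loopA_iter.eq_def]; simp
        rfl
      | cons c2 rest2 =>
        have ih := loopA_in_str rest2 (j+2) depth os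
        simp only [h1, if_pos rfl]
        rw [loopA_iter.eq_def]; simp
        rw [loopA_iter.eq_def]; simp
        have e : j + 1 + 1 = j + 2 := by ring
        rw [e]; exact ih
    · by_cases h2 : c = '"'
      · simp only [if_neg h1, if_pos h2, h2]
        rw [loopA_iter.eq_def]
        simp [h1]
      · have ih := loopA_in_str rest (j+1) depth os
        simp only [if_neg h1, if_neg h2]
        rw [loopA_iter.eq_def]
        simp [h1, h2]
        exact ih

theorem evIn_skipS : ∀ (cs : List Char) (j : Int),
    evIn cs j = evOut (skipS cs j).1 (skipS cs j).2
  | [], j => by rw [skipS.eq_def]; simp; rw [evIn_nil, evOut_nil]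
  | c :: rest, j => by
    rw [skipS.eq_def, evIn_cons]
    by_cases h1 : c = '\\'
    · cases rest with
      | nil => simp only [h1, ite_true]; rw [evOut_nil]
      | cons c2 rest2 =>
        simp only [h1, ite_true]
        exact evIn_skipS rest2 (j+2)
    · by_cases h2 : c = '"'
      · simp [h1, h2]
      · simp only [h1, h2, ite_false]
        exact evIn_skipS rest (j+1)

-- A's char loop equals loopC over the extracted events (invariant: 0 < depth → obj_start = some b)
theorem loopA_to_loopC (n : ℕ) : ∀ (cs : List Char), cs.length ≤ n → ∀ (i depth b : Int)
    (os : Option Int), 0 ≤ depth → (0 < depth → os = some b) →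
    loopA_iter cs i false false depth os = loopC (evOut cs i) depth b := by
  induction n with
  | zero =>
    intro cs hlen i depth b os _ _
    have : cs = [] := by cases cs <;> simp_all
    subst this; rw [loopA_iter.eq_def, evOut_nil, loopC]
  | succ n ih =>
    intro cs hlen i depth b os hd hinv
    cases cs with
    | nil => rw [loopA_iter.eq_def, evOut_nil, loopC]
    | cons c rest =>
      simp only [List.length_cons, Nat.succ_le_succ_iff] at hlen
      by_cases h2 : c = '"'
      · subst h2
        have hA : loopA_iter ('"' :: rest) i false false depth os =
            loopA_iter rest (i+1) true false depth os := by
          rw [loopA_iter.eq_def]; simp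
        have hE : evOut ('"' :: rest) i = evIn rest (i+1) := by
          rw [evOut_cons]; simp
        rw [hA, hE, loopA_in_str, evIn_skipS]
        exact ih _ (le_trans (skipS_len_le rest (i+1)) hlen) _ _ _ _ hd hinv
      · by_cases h3 : c = '{'
        · subst h3
          have hA : loopA_iter ('{' :: rest) i false false depth os =
              loopA_iter rest (i+1) false false (depth+1)
                (if depth = 0 then some i else os) := by
            rw [loopA_iter.eq_def]; simp
          have hE : evOut ('{' :: rest) i = (i, '{') :: evOut rest (i+1) := by
            rw [evOut_cons]; simp
          rw [hA, hE, loopC_cons, if_pos rfl]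
          by_cases h0 : depth = 0
          · simp only [h0, if_pos rfl, ite_true]
            exact ih rest hlen (i+1) (0+1) i (some i) (by omega) (fun _ => rfl)
          · simp only [if_neg h0]
            exact ih rest hlen (i+1) (depth+1) b os (by omega)
              (fun _ => hinv (by omega))
        · by_cases h4 : c = '}'
          · subst h4
            have hE : evOut ('}' :: rest) i = (i, '}') :: evOut rest (i+1) := by
              rw [evOut_cons]; simp
            by_cases hpos : depth > 0
            · have hos := hinv hpos
              subst hos
              by_cases h1d : depth = 1
              · have e0 : depth - 1 = 0 := by omega
                have hA : loopA_iter ('}' :: rest) i false false depth (some b) =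
                    (b, i+1) :: loopA_iter rest (i+1) false false (depth-1) none := by
                  rw [loopA_iter.eq_def]; simp [hpos, e0]
                rw [hA, hE, loopC_cons, if_neg (by decide : ¬ ('}' : Char) = '{'),
                  if_pos hpos, if_pos h1d]
                rw [e0, ih rest hlen (i+1) 0 b none le_rfl (by omega)]
                simp
              · have e0 : ¬ (depth - 1 = 0) := by omega
                have hA : loopA_iter ('}' :: rest) i false false depth (some b) =
                    loopA_iter rest (i+1) false false (depth-1) (some b) := by
                  rw [loopA_iter.eq_def]; simp [hpos, e0]
                rw [hA, hE, loopC_cons, if_neg (by decide : ¬ ('}' : Char) = '{'),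
                  if_pos hpos, if_neg h1d]
                simp only [List.nil_append]
                exact ih rest hlen (i+1) (depth-1) b (some b) (by omega) (fun _ => rfl)
            · have hA : loopA_iter ('}' :: rest) i false false depth os =
                  loopA_iter rest (i+1) false false depth os := by
                rw [loopA_iter.eq_def]; simp [hpos]
              rw [hA, hE, loopC_cons, if_neg (by decide : ¬ ('}' : Char) = '{'), if_neg hpos]
              exact ih rest hlen (i+1) depth b os hd hinv
          · have hA : loopA_iter (c :: rest) i false false depth os =
                loopA_iter rest (i+1) false false depth os := by
              rw [loopA_iter.eq_def]; simp [h2, h3, h4]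
            have hE : evOut (c :: rest) i = evOut rest (i+1) := by
              rw [evOut_cons]
              have hb : ¬ (c = '{' ∨ c = '}') := by tauto
              simp [h2, hb]
            rw [hA, hE]
            exact ih rest hlen (i+1) depth b os hd hinv

-- pairing lemma-- pairing lemma: loopC over a brace-only event list equals the zip of start/end transitions
theorem loopC_zip : ∀ (es : List (Int × Char)) (d b : Int), 0 ≤ d →
    (∀ p ∈ es, p.2 = '{' ∨ p.2 = '}') →
    loopC es d b =
      ((if d = 0 then [] else [b]) ++ startsB es (depthsB es d)).zip (endsB es (depthsB es d))
  | [], d, b, hd, hbr => by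
    rw [loopC_nil]
    simp [startsB, endsB, depthsB]
  | (i, c) :: r, d, b, hd, hbr => by
    have hbr2 : ∀ p ∈ r, p.2 = '{' ∨ p.2 = '}' := fun p hp => hbr p (List.mem_cons_of_mem _ hp)
    have hc : c = '{' ∨ c = '}' := hbr (i, c) (List.mem_cons_self ..)
    rw [loopC_cons, depthsB]
    rcases hc with hc | hc
    · subst hc
      have hob : (('{' : Char) == '{') = true := by decide
      have hcb : (('{' : Char) == '}') = false := by decide
      simp only [if_pos rfl, startsB, endsB, List.zip_cons_cons, List.filterMap_cons, hob, hcb,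
        Bool.true_and, Bool.false_and, Bool.false_eq_true, if_false]
      by_cases h0 : d = 0
      · subst h0
        have : ((0 : Int) == 0) = true := by decide
        simp only [if_pos rfl, ite_true, this]
        norm_num
        rw [loopC_zip r 1 i (by omega) hbr2]
        simp [startsB, endsB]
      · have hdb : (d == 0) = false := by simp [h0]
        simp only [if_neg h0, hdb, Bool.false_eq_true, if_false]
        rw [loopC_zip r (d+1) b (by omega) hbr2]
        have : ¬ (d + 1 = 0) := by omega
        simp [h0, this, startsB, endsB]
    · subst hc
      have hne : ¬ (('}' : Char) = '{') := by decide
      have hob : (('}' : Char) == '{') = false := by decide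
      have hcb : (('}' : Char) == '}') = true := by decide
      simp only [if_neg hne, startsB, endsB, List.zip_cons_cons, List.filterMap_cons, hob, hcb,
        Bool.true_and, Bool.false_and, Bool.false_eq_true, if_false]
      by_cases hpos : d > 0
      · simp only [if_pos hpos]
        by_cases h1 : d = 1
        · subst h1
          have hdb : ((1 : Int) == 1) = true := by decide
          simp only [if_pos rfl, ite_true, hdb]
          norm_num
          rw [loopC_zip r 0 b le_rfl hbr2]
          simp [startsB, endsB]
        · have hdb : (d == 1) = false := by simp [h1]
          simp only [if_neg h1, hdb, Bool.false_eq_true, if_false]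
          have e : max (d - 1 : Int) 0 = d - 1 := by omega
          rw [e, loopC_zip r (d-1) b (by omega) hbr2]
          have h0 : ¬ (d = 0) := by omega
          have h0b : ¬ (d - 1 = 0) := by omega
          simp [h0, h0b, startsB, endsB]
      · have h0 : d = 0 := by omega
        subst h0
        simp only [if_neg hpos]
        have e : max (0 - 1 : Int) 0 = 0 := by omega
        have hdb : ((0 : Int) == 1) = false := by decide
        rw [e, loopC_zip r 0 b le_rfl hbr2]
        simp [hdb, startsB, endsB]

-- ===== VERDICT (by name: the statement is the Claim_ definition above) =====
theorem iter_top_level_objects_py_spec : Claim_equal_iter_top_level_objects_py := by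
  intro text _
  unfold Spec_iter_top_level_objects_py iter_top_level_objects_py iter_top_level_objects_py_alt
  have hev : eventsB text.toList = evOut text.toList 0 := by
    rw [eventsB_eq]; exact eventsB_out text.toList 0
  rw [loopA_to_loopC text.toList.length text.toList le_rfl 0 0 0 none le_rfl (by omega)]
  rw [loopC_zip (evOut text.toList 0) 0 0 le_rfl (evOut_braces text.toList 0)]
  simp [hev]
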